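-- pv_equiv track=rewrite | github.com/jaewie/algorithms | python/misc/sets.py | recursive_pset
-- ===== SOURCE A (Python) =====
-- def recursive_pset(s):
--     ''' Return the powerset of string s.'''
--
--     if not s:
--         return [""]
--
--     char = s[0]
--     sets = recursive_pset(s[1:])
--     res = []
--     res.extend(recursive_pset(s[1:]))
--     for st in sets:
--         res.append(st + char)
--     return res
-- ===== SOURCE B (Python) =====
-- def recursive_pset(s):
--     ''' Return the powerset of string s.'''
--     result = [""]
--     for char in reversed(s):
--         result = result + [x + char for x in result]
--     return result
-- ===== Notes on version B (the rewrite author's own statement) =====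
-- stated objective: alternative
-- what changed: Replaced the double-recursive top-down construction (which recomputes the powerset of the tail twice at every level) by a bottom-up iterative doubling loop over the characters in reverse order.
import Mathlib
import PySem

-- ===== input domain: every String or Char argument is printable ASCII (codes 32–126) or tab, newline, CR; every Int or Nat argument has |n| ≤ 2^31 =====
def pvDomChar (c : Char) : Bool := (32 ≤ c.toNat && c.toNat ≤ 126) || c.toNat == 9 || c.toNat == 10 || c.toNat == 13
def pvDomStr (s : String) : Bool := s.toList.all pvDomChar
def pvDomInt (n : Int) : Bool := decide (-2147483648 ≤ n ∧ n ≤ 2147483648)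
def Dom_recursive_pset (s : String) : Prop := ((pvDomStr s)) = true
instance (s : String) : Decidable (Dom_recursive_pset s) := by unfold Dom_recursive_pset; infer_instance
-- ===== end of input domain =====

-- ===== PORT A =====
-- B builds the same powerset bottom-up with one iterative doubling pass instead of A's twin recursive calls (objective: alternative decomposition).
def recA (l : List Char) : List String :=
  match l with
  | [] => [""]
  | char :: rest =>
    let sets := recA rest
    let res := recA rest
    res ++ sets.map (fun st => st ++ String.ofList [char])

def recursive_pset (s : String) : List String := recA s.toList

-- ===== PORT B =====
def stepB (acc : List String) (char : Char) : List String :=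
  acc ++ acc.map (fun x => x ++ String.ofList [char])

def recursive_pset_alt (s : String) : List String :=
  s.toList.reverse.foldl stepB [""]

-- ===== PRECONDITION & SPEC =====
def Spec_recursive_pset (s : String) (out : List String) : Prop := out = recursive_pset_alt s
instance (s : String) (out : List String) : Decidable (Spec_recursive_pset s out) := by unfold Spec_recursive_pset; infer_instance

-- ===== CLAIM (what is proved, stated in full; the proofs are below) =====
def Claim_equal_recursive_pset : Prop := ∀ (s : String), Dom_recursive_pset s → Spec_recursive_pset s (recursive_pset s)

-- ===== LEMMAS AND PROOFS =====

-- ===== VERDICT (by name: the statement is the Claim_ definition above) =====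
theorem foldB_eq_recA (l : List Char) : l.reverse.foldl stepB [""] = recA l := by
  induction l with
  | nil => rfl
  | cons c rest ih =>
    simp only [List.reverse_cons, List.foldl_append, List.foldl_cons, List.foldl_nil, ih]
    rfl

theorem recursive_pset_spec : Claim_equal_recursive_pset := by
  intro s _
  unfold Spec_recursive_pset recursive_pset recursive_pset_alt
  exact (foldB_eq_recA s.toList).symm
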